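-- pv_equiv track=rewrite | github.com/twentyhq/twenty | scripts/seed-carrier-product-commissions.py | classify_product
-- ===== SOURCE A (Python) =====
-- def classify_product(product_name, carrier_name=""):
--     """Classify product name into type and LTV amount (micros)."""
--     name = product_name.lower()
--     carrier = carrier_name.lower()
--
--     # Health Sharing (UHF / Universal Health Fellowship)
--     if "health sharing" in name or "uhf" in name or "universal health fellowship" in carrier:
--         return "health_sharing", 630_000_000
--
--     # Major Medical / ACA
--     if any(k in name for k in ["major medical", "aca -", "aca-"]):
--         return "aca", 330_000_000
--
--     # Auto insurance (by product name or carrier)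
--     if "auto" in name or "geico" in carrier or "the general" in carrier:
--         return "auto", 330_000_000
--
--     # Dental
--     if "dental" in name:
--         return "ancillary", 117_000_000
--
--     # Vision
--     if "vision" in name:
--         return "ancillary", 117_000_000
--
--     # Telemedicine
--     if "telemedicine" in name or "telehealth" in name:
--         return "ancillary", 117_000_000
--
--     # Fixed Indemnity / Hospital
--     if "hospital" in name or "fixed indemnity" in name:
--         return "core", 242_000_000
--
--     # Short Term Medical / TriTerm
--     if "short term" in name or "triterm" in name or "tri-term" in name:
--         return "core", 242_000_000
--
--     # Life
--     if "life" in name: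
--         return "core", 242_000_000
--
--     # Accident / Critical Illness → ancillary
--     if "accident" in name or "critical" in name:
--         return "ancillary", 117_000_000
--
--     # Default: ancillary
--     return "ancillary", 117_000_000
-- ===== SOURCE B (Python) =====
-- # Alternative decomposition: collect ALL keyword matches, then pick the best
-- # (lowest-priority) one, instead of an ordered first-match if-cascade.
-- # Correct because priorities are nondecreasing down the table and keywords
-- # sharing a priority share one result.
-- _KEYWORDS = [
--     # (keyword, match_carrier_field, priority, type, ltv_micros)
--     ("health sharing", False, 0, "health_sharing", 630_000_000),
--     ("uhf", False, 0, "health_sharing", 630_000_000),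
--     ("universal health fellowship", True, 0, "health_sharing", 630_000_000),
--     ("major medical", False, 1, "aca", 330_000_000),
--     ("aca -", False, 1, "aca", 330_000_000),
--     ("aca-", False, 1, "aca", 330_000_000),
--     ("auto", False, 2, "auto", 330_000_000),
--     ("geico", True, 2, "auto", 330_000_000),
--     ("the general", True, 2, "auto", 330_000_000),
--     ("dental", False, 3, "ancillary", 117_000_000),
--     ("vision", False, 4, "ancillary", 117_000_000),
--     ("telemedicine", False, 5, "ancillary", 117_000_000),
--     ("telehealth", False, 5, "ancillary", 117_000_000),
--     ("hospital", False, 6, "core", 242_000_000),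
--     ("fixed indemnity", False, 6, "core", 242_000_000),
--     ("short term", False, 7, "core", 242_000_000),
--     ("triterm", False, 7, "core", 242_000_000),
--     ("tri-term", False, 7, "core", 242_000_000),
--     ("life", False, 8, "core", 242_000_000),
--     ("accident", False, 9, "ancillary", 117_000_000),
--     ("critical", False, 9, "ancillary", 117_000_000),
-- ]
--
-- def classify_product(product_name, carrier_name=""):
--     """Classify product name into type and LTV amount (micros)."""
--     name = product_name.lower()
--     carrier = carrier_name.lower()
--     hits = [(p, t, v) for (k, c, p, t, v) in _KEYWORDS
--             if k in (carrier if c else name)]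
--     best = min(hits, key=lambda h: h[0], default=None)
--     if best is None:
--         return "ancillary", 117_000_000
--     return best[1], best[2]
-- ===== Notes on version B (the rewrite author's own statement) =====
-- stated objective: alternative
-- what changed: Instead of an ordered first-match if-cascade, B flattens the rules into one keyword table, collects the complete set of matching keywords in a single comprehension, and then selects the result by minimum priority (min with key); agreement follows because priorities are nondecreasing in table order.
import Mathlib
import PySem

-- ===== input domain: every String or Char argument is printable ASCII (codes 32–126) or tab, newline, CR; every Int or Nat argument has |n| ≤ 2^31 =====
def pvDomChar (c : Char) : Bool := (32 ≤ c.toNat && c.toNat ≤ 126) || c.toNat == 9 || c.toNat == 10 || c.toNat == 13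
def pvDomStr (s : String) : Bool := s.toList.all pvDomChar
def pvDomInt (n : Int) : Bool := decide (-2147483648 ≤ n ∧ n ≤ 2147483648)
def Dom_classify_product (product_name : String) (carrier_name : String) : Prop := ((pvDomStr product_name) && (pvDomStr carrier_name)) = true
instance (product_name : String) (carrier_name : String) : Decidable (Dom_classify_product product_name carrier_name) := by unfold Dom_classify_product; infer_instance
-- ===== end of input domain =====

-- B collects the complete set of keyword matches from one flat table and picks the
-- minimum-priority one, instead of A's ordered first-match if-cascade (objective: alternative).

-- ===== PORT A =====
def classify_product (product_name : String) (carrier_name : String) : String × Int :=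
  let name := PySem.Str.lower product_name
  let carrier := PySem.Str.lower carrier_name
  if PySem.Str.isIn "health sharing" name || PySem.Str.isIn "uhf" name
      || PySem.Str.isIn "universal health fellowship" carrier then
    ("health_sharing", 630000000)
  else if (["major medical", "aca -", "aca-"] : List String).any (fun k => PySem.Str.isIn k name) then
    ("aca", 330000000)
  else if PySem.Str.isIn "auto" name || PySem.Str.isIn "geico" carrier
      || PySem.Str.isIn "the general" carrier then
    ("auto", 330000000)
  else if PySem.Str.isIn "dental" name then
    ("ancillary", 117000000)
  else if PySem.Str.isIn "vision" name then
    ("ancillary", 117000000)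
  else if PySem.Str.isIn "telemedicine" name || PySem.Str.isIn "telehealth" name then
    ("ancillary", 117000000)
  else if PySem.Str.isIn "hospital" name || PySem.Str.isIn "fixed indemnity" name then
    ("core", 242000000)
  else if PySem.Str.isIn "short term" name || PySem.Str.isIn "triterm" name
      || PySem.Str.isIn "tri-term" name then
    ("core", 242000000)
  else if PySem.Str.isIn "life" name then
    ("core", 242000000)
  else if PySem.Str.isIn "accident" name || PySem.Str.isIn "critical" name then
    ("ancillary", 117000000)
  else
    ("ancillary", 117000000)

-- ===== PORT B =====
-- the flat keyword table of Source B: (keyword, match_carrier_field, priority, type, ltv)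
def pvKeywords : List (String × Bool × Int × String × Int) :=
  [ ("health sharing", false, 0, "health_sharing", 630000000),
    ("uhf", false, 0, "health_sharing", 630000000),
    ("universal health fellowship", true, 0, "health_sharing", 630000000),
    ("major medical", false, 1, "aca", 330000000),
    ("aca -", false, 1, "aca", 330000000),
    ("aca-", false, 1, "aca", 330000000),
    ("auto", false, 2, "auto", 330000000),
    ("geico", true, 2, "auto", 330000000),
    ("the general", true, 2, "auto", 330000000),
    ("dental", false, 3, "ancillary", 117000000),
    ("vision", false, 4, "ancillary", 117000000),
    ("telemedicine", false, 5, "ancillary", 117000000),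
    ("telehealth", false, 5, "ancillary", 117000000),
    ("hospital", false, 6, "core", 242000000),
    ("fixed indemnity", false, 6, "core", 242000000),
    ("short term", false, 7, "core", 242000000),
    ("triterm", false, 7, "core", 242000000),
    ("tri-term", false, 7, "core", 242000000),
    ("life", false, 8, "core", 242000000),
    ("accident", false, 9, "ancillary", 117000000),
    ("critical", false, 9, "ancillary", 117000000) ]

-- the comprehension of Source B: all matching keywords, projected to (priority, type, ltv)
def pvHits (name carrier : String) : List (Int × String × Int) :=
  (pvKeywords.filter (fun e => PySem.Str.isIn e.1 (if e.2.1 then carrier else name))).map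
    (fun e => e.2.2)

def classify_product_alt (product_name : String) (carrier_name : String) : String × Int :=
  match PySem.List.min? (pvHits (PySem.Str.lower product_name) (PySem.Str.lower carrier_name))
      (fun h => h.1) with
  | some b => (b.2.1, b.2.2)
  | none => ("ancillary", 117000000)

-- ===== PRECONDITION & SPEC =====
def Spec_classify_product (product_name : String) (carrier_name : String) (out : String × Int) : Prop := out = classify_product_alt product_name carrier_name
instance (product_name : String) (carrier_name : String) (out : String × Int) : Decidable (Spec_classify_product product_name carrier_name out) := by unfold Spec_classify_product; infer_instance

-- ===== CLAIM (what is proved, stated in full; the proofs are below) =====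
def Claim_equal_classify_product : Prop := ∀ (product_name : String) (carrier_name : String), Dom_classify_product product_name carrier_name → Spec_classify_product product_name carrier_name (classify_product product_name carrier_name)

-- ===== LEMMAS AND PROOFS =====

-- Python's min keeps the earliest element whose key is minimal; if the head's key is
-- a lower bound of the tail, the fold never replaces it.
theorem pv_foldl_min_keep {α : Type} (key : α → Int) (m : α) (l : List α)
    (h : ∀ y ∈ l, key m ≤ key y) :
    l.foldl
      (fun acc x =>
        match acc with
        | none => some x
        | some m' => if key x < key m' then some x else some m') (some m) = some m := by
  induction l generalizing m with
  | nil => rfl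
  | cons x t ih =>
    simp only [List.foldl_cons]
    rw [if_neg (not_lt.mpr (h x (by simp)))]
    exact ih m (fun y hy => h y (by simp [hy]))

-- On a list with nondecreasing keys, min-with-key is the head.
theorem pv_min?_eq_head {α : Type} (key : α → Int) (l : List α)
    (h : l.Pairwise (fun a b => key a ≤ key b)) :
    PySem.List.min? l key = l.head? := by
  cases l with
  | nil => rfl
  | cons x t =>
    rcases List.pairwise_cons.mp h with ⟨hx, _⟩
    unfold PySem.List.min?
    simp only [List.foldl_cons, List.head?_cons]
    exact pv_foldl_min_keep key x t hx

-- the keyword table is listed in nondecreasing priority order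
theorem pvKeywords_pairwise :
    pvKeywords.Pairwise (fun a b => a.2.2.1 ≤ b.2.2.1) := by decide

theorem pvHits_pairwise (name carrier : String) :
    (pvHits name carrier).Pairwise (fun a b => a.1 ≤ b.1) := by
  unfold pvHits
  exact ((pvKeywords_pairwise.filter _).map _ (fun a b h => h))

theorem pvHits_min_eq_head (name carrier : String) :
    PySem.List.min? (pvHits name carrier) (fun h => h.1) = (pvHits name carrier).head? :=
  pv_min?_eq_head _ _ (pvHits_pairwise name carrier)

-- ===== VERDICT (by name: the statement is the Claim_ definition above) =====
theorem classify_product_spec : Claim_equal_classify_product := by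
  intro pn cn _
  unfold Spec_classify_product classify_product_alt
  rw [pvHits_min_eq_head]
  unfold classify_product pvHits pvKeywords
  set nm := PySem.Str.lower pn with hnm
  set cr := PySem.Str.lower cn with hcr
  by_cases a1 : PySem.Str.isIn "health sharing" nm = true
  · simp_all
  by_cases a2 : PySem.Str.isIn "uhf" nm = true
  · simp_all
  by_cases a3 : PySem.Str.isIn "universal health fellowship" cr = true
  · simp_all
  by_cases a4 : PySem.Str.isIn "major medical" nm = true
  · simp_all
  by_cases a5 : PySem.Str.isIn "aca -" nm = true
  · simp_all
  by_cases a6 : PySem.Str.isIn "aca-" nm = true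
  · simp_all
  by_cases a7 : PySem.Str.isIn "auto" nm = true
  · simp_all
  by_cases a8 : PySem.Str.isIn "geico" cr = true
  · simp_all
  by_cases a9 : PySem.Str.isIn "the general" cr = true
  · simp_all
  by_cases a10 : PySem.Str.isIn "dental" nm = true
  · simp_all
  by_cases a11 : PySem.Str.isIn "vision" nm = true
  · simp_all
  by_cases a12 : PySem.Str.isIn "telemedicine" nm = true
  · simp_all
  by_cases a13 : PySem.Str.isIn "telehealth" nm = true
  · simp_all
  by_cases a14 : PySem.Str.isIn "hospital" nm = true
  · simp_all
  by_cases a15 : PySem.Str.isIn "fixed indemnity" nm = true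
  · simp_all
  by_cases a16 : PySem.Str.isIn "short term" nm = true
  · simp_all
  by_cases a17 : PySem.Str.isIn "triterm" nm = true
  · simp_all
  by_cases a18 : PySem.Str.isIn "tri-term" nm = true
  · simp_all
  by_cases a19 : PySem.Str.isIn "life" nm = true
  · simp_all
  by_cases a20 : PySem.Str.isIn "accident" nm = true
  · simp_all
  by_cases a21 : PySem.Str.isIn "critical" nm = true
  · simp_all
  simp_all
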